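-- pv_equiv track=rewrite | github.com/JeganVG/Commvault-Internship | Dynamic Programming/LongestCommonSubString.py | func
-- ===== SOURCE A (Python) =====
-- def func(i, j, s, t, dp):
--     if(i<0 or j<0): return 0
--
--     if(dp[i][j]!=-1): return dp[i][j]
--
--     if(s[i] == t[j]):
--         dp[i][j] = 1 + func(i-1, j-1, s, t, dp)
--         return dp[i][j]
--     else: dp[i][j] = 0
--
--     return dp[i][j]
-- ===== SOURCE B (Python) =====
-- def func(i, j, s, t, dp):
--     # Iterative diagonal walk instead of recursion: count matching cells,
--     # then fill the memo table back-to-front.  Same dp mutations as A.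
--     k = 0
--     base = 0
--     while i - k >= 0 and j - k >= 0:
--         v = dp[i - k][j - k]
--         if v != -1:
--             base = v
--             break
--         if s[i - k] != t[j - k]:
--             dp[i - k][j - k] = 0
--             break
--         k += 1
--     for d in range(k):
--         dp[i - d][j - d] = base + k - d
--     return base + k
-- ===== Notes on version B (the rewrite author's own statement) =====
-- stated objective: simpler
-- what changed: Replaces A's diagonal memo recursion by a single iterative while-loop that walks the diagonal counting matches (then a small loop back-fills the dp cells with the same writes A performs), returning base + k instead of unwinding a call stack.
import Mathlib
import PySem

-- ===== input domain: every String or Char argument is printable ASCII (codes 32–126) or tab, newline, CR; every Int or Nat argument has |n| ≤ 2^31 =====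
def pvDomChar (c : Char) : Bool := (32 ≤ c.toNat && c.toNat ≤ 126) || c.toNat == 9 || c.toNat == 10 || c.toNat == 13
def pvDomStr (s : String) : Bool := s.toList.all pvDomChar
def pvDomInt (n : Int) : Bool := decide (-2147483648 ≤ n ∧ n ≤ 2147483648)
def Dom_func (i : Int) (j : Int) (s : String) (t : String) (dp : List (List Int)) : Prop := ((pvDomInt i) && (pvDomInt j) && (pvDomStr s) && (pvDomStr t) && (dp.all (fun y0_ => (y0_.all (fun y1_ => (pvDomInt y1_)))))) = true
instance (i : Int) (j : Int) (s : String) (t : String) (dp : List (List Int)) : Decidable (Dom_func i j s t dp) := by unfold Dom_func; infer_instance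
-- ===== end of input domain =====

-- B replaces A's diagonal recursion by an iterative walk + back-fill (objective: simpler,
-- no recursion).  A mutates dp in place; B performs the same dp writes; the equivalence
-- proved here is about the RETURN value only.

-- ===== PORT A =====
-- literal transliteration of A's recursion, made structural by a fuel parameter that is
-- provably sufficient: fuel = (i+1).toNat, so fuel 0 implies i < 0, where A returns 0 —
-- the fuel only makes the same computation total, it changes no value.  Where Python
-- would raise IndexError (an out-of-range dp/s/t access, pyGet? = none) the port
-- returns 0 — exactly those inputs are excluded by Pre_func.  dp[i][j] = 1 + func(...);
-- return dp[i][j] reads back the value just written, hence '1 + ...'.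
def funcAux (s : String) (t : String) (dp : List (List Int)) : Nat → Int → Int → Int
  | 0, _, _ => 0
  | fuel + 1, i, j =>
    if i < 0 ∨ j < 0 then 0
    else
      match (PySem.List.pyGet? dp i).bind (fun row => PySem.List.pyGet? row j) with
      | none => 0
      | some v =>
        if v ≠ -1 then v
        else
          match PySem.Str.pyGet? s i, PySem.Str.pyGet? t j with
          | some a, some b => if a = b then 1 + funcAux s t dp fuel (i - 1) (j - 1) else 0
          | _, _ => 0

def func (i : Int) (j : Int) (s : String) (t : String) (dp : List (List Int)) : Int :=
  funcAux s t dp (i + 1).toNat i j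

-- ===== PORT B =====
-- the while-loop of Source B, with the same sufficient fuel (fuel 0 implies i - k < 0,
-- where the loop condition fails): k counts matched diagonal cells, the pair returned
-- is (k, base).  The dp-filling for-loop of Source B only mutates dp and has no Lean
-- counterpart (return-value equivalence); the returned value is base + k.
def altWalk (i : Int) (j : Int) (s : String) (t : String) (dp : List (List Int)) : Nat → Nat → Nat × Int
  | 0, k => (k, 0)
  | fuel + 1, k =>
    if 0 ≤ i - k ∧ 0 ≤ j - k then
      let v? := (PySem.List.pyGet? dp (i - k)).bind (fun row => PySem.List.pyGet? row (j - k))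
      if v?.isNone then (k, 0)   -- Python raises IndexError here; outside Pre_func
      else
        let v := v?.getD 0
        if v ≠ -1 then (k, v)
        else
          let a? := PySem.Str.pyGet? s (i - k)
          let b? := PySem.Str.pyGet? t (j - k)
          if a?.isNone ∨ b?.isNone then (k, 0)   -- Python raises IndexError here; outside Pre_func
          else if a?.getD ' ' ≠ b?.getD ' ' then (k, 0)
          else altWalk i j s t dp fuel (k + 1)
    else (k, 0)

def func_alt (i : Int) (j : Int) (s : String) (t : String) (dp : List (List Int)) : Int :=
  (altWalk i j s t dp (i + 1).toNat 0).2 + ((altWalk i j s t dp (i + 1).toNat 0).1 : Int)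

-- ===== PRECONDITION & SPEC =====
-- the dp / string lookups at diagonal step k
def pvDpAt (i j : Int) (dp : List (List Int)) (k : Nat) : Option Int :=
  (PySem.List.pyGet? dp (i - k)).bind (fun row => PySem.List.pyGet? row (j - k))
def pvChAt (s : String) (i : Int) (k : Nat) : Option Char := PySem.Str.pyGet? s (i - k)
-- 'the walk continues past step k': the dp cell is -1 and the two characters exist and match
def pvCont (i j : Int) (s t : String) (dp : List (List Int)) (k : Nat) : Bool :=
  (pvDpAt i j dp k == some (-1)) && (pvChAt s i k).isSome && (pvChAt s i k == pvChAt t j k)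
-- 'no IndexError at step k': the dp cell exists, and if it is -1 both characters exist
def pvSafe (i j : Int) (s t : String) (dp : List (List Int)) (k : Nat) : Bool :=
  (pvDpAt i j dp k).isSome &&
    (pvDpAt i j dp k != some (-1) || ((pvChAt s i k).isSome && (pvChAt t j k).isSome))

-- Pre_func excludes EXACTLY the inputs on which A raises IndexError: those where the
-- diagonal walk from (i,j), before stopping at a memo hit or a character mismatch,
-- reaches a cell whose dp row/entry or string position is out of range.  On every
-- input A returns normally, Pre_func holds (no input A returns on is excluded).
def Pre_func (i : Int) (j : Int) (s : String) (t : String) (dp : List (List Int)) : Prop :=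
  ¬ (i < 0 ∨ j < 0) →
    ∀ k ∈ List.range (min i.toNat j.toNat + 1),
      (∀ k' ∈ List.range k, pvCont i j s t dp k' = true) → pvSafe i j s t dp k = true
instance (i : Int) (j : Int) (s : String) (t : String) (dp : List (List Int)) : Decidable (Pre_func i j s t dp) := by unfold Pre_func; infer_instance

def pvWitness_func : Int × Int × String × String × List (List Int) :=
  (0, 0, "a", "a", [[-1]])

def Spec_func (i : Int) (j : Int) (s : String) (t : String) (dp : List (List Int)) (out : Int) : Prop := out = func_alt i j s t dp
instance (i : Int) (j : Int) (s : String) (t : String) (dp : List (List Int)) (out : Int) : Decidable (Spec_func i j s t dp out) := by unfold Spec_func; infer_instance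

-- ===== CLAIM (what is proved, stated in full; the proofs are below) =====
def Claim_equal_func : Prop := ∀ (i : Int) (j : Int) (s : String) (t : String) (dp : List (List Int)), Dom_func i j s t dp → Pre_func i j s t dp → Spec_func i j s t dp (func i j s t dp)

-- ===== LEMMAS AND PROOFS =====

-- loop invariant: at loop counter k, (base + k) of B's walk equals A's recursion
-- started at the shifted indices, plus k, for the SAME fuel.  (Holds for ALL inputs,
-- since both ports return 0 at the same failing lookup — the cell where Python raises.)
theorem altWalk_eq (s t : String) (dp : List (List Int)) (i : Int) (j : Int) :
    ∀ (fuel : Nat) (k : Nat),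
      (altWalk i j s t dp fuel k).2 + ((altWalk i j s t dp fuel k).1 : Int)
        = funcAux s t dp fuel (i - k) (j - k) + k := by
  intro fuel
  induction fuel with
  | zero => intro k; simp [altWalk, funcAux]
  | succ n ih =>
    intro k
    rw [altWalk, funcAux]
    by_cases hin : 0 ≤ i - (k:Int) ∧ 0 ≤ j - (k:Int)
    · rw [if_pos hin, if_neg (show ¬(i - (k:Int) < 0 ∨ j - (k:Int) < 0) by omega)]
      rcases hv : (PySem.List.pyGet? dp (i - (k:Int))).bind (fun row => PySem.List.pyGet? row (j - (k:Int))) with _ | v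
      · simp
      · simp only [Option.isNone_some, Bool.false_eq_true, if_false, Option.getD_some]
        by_cases hm : v ≠ -1
        · simp [hm]
        · simp only [hm, if_false]
          simp only [not_not] at hm
          rcases hs : PySem.Str.pyGet? s (i - (k:Int)) with _ | a <;>
            rcases ht : PySem.Str.pyGet? t (j - (k:Int)) with _ | b <;>
            simp only [Option.isNone_none, Option.isNone_some, Bool.false_eq_true,
                       true_or, or_true, or_self, if_true, if_false, Option.getD_some]
          by_cases hab : a = b
          · simp only [if_pos hab, if_neg (not_not.mpr hab)]
            have hrec := ih (k + 1)
            push_cast at hrec ⊢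
            have e1 : i - ((k:Int) + 1) = i - (k:Int) - 1 := by ring
            have e2 : j - ((k:Int) + 1) = j - (k:Int) - 1 := by ring
            rw [e1, e2] at hrec
            omega
          · simp [hab]
    · rw [if_neg hin, if_pos (show i - (k:Int) < 0 ∨ j - (k:Int) < 0 by omega)]

-- ===== VERDICT (by name: the statement is the Claim_ definition above) =====
theorem func_spec : Claim_equal_func := by
  intro i j s t dp _ _
  unfold Spec_func func_alt func
  have h := altWalk_eq s t dp i j (i + 1).toNat 0
  simp only [Nat.cast_zero, sub_zero, add_zero] at h
  omega
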